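-- pv_equiv track=rewrite | github.com/sagar24263/Password_Manager | apps/gui.py | get_weaknesses_in_password
-- ===== SOURCE A (Python) =====
-- def get_weaknesses_in_password(password: str):
--     result = ''
--     if len(password) < 8:
--         result += f'\u2022 Password contains {len(password)} characters, a minimum of 8 characters is recommended\n'
--     small_letter_found = False
--     cap_letter_found = False
--     num_found = False
--     for letter in password:
--         if letter.islower():
--             small_letter_found = True
--             break
--     for letter in password:
--         if letter.isupper():
--             cap_letter_found = True
--             break
--     for letter in password:
--         if letter.isdigit():
--             num_found = True
--             break
--     if not small_letter_found:
--         result += '\u2022Password contains no small letters\n'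
--     if not cap_letter_found:
--         result += '\u2022Password contains no capital letters\n'
--     if not num_found:
--         result += '\u2022Password contains no numbers'
--     return result.strip('\n')
-- ===== SOURCE B (Python) =====
-- def get_weaknesses_in_password(password: str):
--     # single pass maintaining three flags instead of three separate scans
--     small = cap = num = False
--     for ch in password:
--         small = small or ch.islower()
--         cap = cap or ch.isupper()
--         num = num or ch.isdigit()
--     parts = []
--     if len(password) < 8:
--         parts.append(f'\u2022 Password contains {len(password)} characters, a minimum of 8 characters is recommended\n')
--     if not small:
--         parts.append('\u2022Password contains no small letters\n')
--     if not cap: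
--         parts.append('\u2022Password contains no capital letters\n')
--     if not num:
--         parts.append('\u2022Password contains no numbers')
--     return ''.join(parts).strip('\n')
-- ===== Notes on version B (the rewrite author's own statement) =====
-- stated objective: simpler
-- what changed: Replaces A's three separate break-on-first-match scans of the password with one combined pass maintaining three flags, and builds the message from a list of parts joined once instead of repeated string concatenation.
import Mathlib
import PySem

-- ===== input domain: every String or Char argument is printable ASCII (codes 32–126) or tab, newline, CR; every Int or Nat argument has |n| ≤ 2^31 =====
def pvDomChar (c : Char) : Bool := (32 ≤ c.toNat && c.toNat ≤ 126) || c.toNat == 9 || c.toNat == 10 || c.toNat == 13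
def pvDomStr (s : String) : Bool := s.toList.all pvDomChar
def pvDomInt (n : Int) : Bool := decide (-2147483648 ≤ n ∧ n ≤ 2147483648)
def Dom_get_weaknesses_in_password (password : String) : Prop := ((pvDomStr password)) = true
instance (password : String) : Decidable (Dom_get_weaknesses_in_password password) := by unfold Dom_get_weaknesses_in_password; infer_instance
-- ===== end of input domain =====

-- B merges A's three break-on-first-match scans into one pass keeping three flags and joins message parts once; objective: simpler.


-- ===== PORT A =====
-- A's first loop: break on the first lowercase letter
def pvLoopLower : List Char → Bool
  | [] => false
  | c :: rest => if PySem.Chars.islower c then true else pvLoopLower rest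

-- A's second loop: break on the first uppercase letter
def pvLoopUpper : List Char → Bool
  | [] => false
  | c :: rest => if PySem.Chars.isupper c then true else pvLoopUpper rest

-- A's third loop: break on the first digit
def pvLoopDigit : List Char → Bool
  | [] => false
  | c :: rest => if PySem.Chars.isdigit c then true else pvLoopDigit rest

def get_weaknesses_in_password (password : String) : String :=
  let result := ""
  let result := if password.toList.length < 8 then
      result ++ "• Password contains " ++ PySem.Int.toStr (password.toList.length : Int) ++
        " characters, a minimum of 8 characters is recommended\n"
    else result
  let small_letter_found := pvLoopLower password.toList
  let cap_letter_found := pvLoopUpper password.toList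
  let num_found := pvLoopDigit password.toList
  let result := if small_letter_found then result else result ++ "•Password contains no small letters\n"
  let result := if cap_letter_found then result else result ++ "•Password contains no capital letters\n"
  let result := if num_found then result else result ++ "•Password contains no numbers"
  PySem.Str.stripChars result "\n"

-- ===== PORT B =====
-- B's single combined pass over the password, three flags in one accumulator
def pvScanFlags : List Char → Bool × Bool × Bool → Bool × Bool × Bool
  | [], acc => acc
  | c :: rest, (s, u, d) =>
      pvScanFlags rest (s || PySem.Chars.islower c, u || PySem.Chars.isupper c, d || PySem.Chars.isdigit c)

def get_weaknesses_in_password_alt (password : String) : String :=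
  let flags := pvScanFlags password.toList (false, false, false)
  let parts : List String :=
    (if password.toList.length < 8 then
        ["• Password contains " ++ PySem.Int.toStr (password.toList.length : Int) ++
          " characters, a minimum of 8 characters is recommended\n"]
      else []) ++
    (if flags.1 then [] else ["•Password contains no small letters\n"]) ++
    (if flags.2.1 then [] else ["•Password contains no capital letters\n"]) ++
    (if flags.2.2 then [] else ["•Password contains no numbers"])
  PySem.Str.stripChars (PySem.Str.join "" parts) "\n"

-- ===== PRECONDITION & SPEC =====
def Spec_get_weaknesses_in_password (password : String) (out : String) : Prop := out = get_weaknesses_in_password_alt password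
instance (password : String) (out : String) : Decidable (Spec_get_weaknesses_in_password password out) := by unfold Spec_get_weaknesses_in_password; infer_instance

-- ===== CLAIM (what is proved, stated in full; the proofs are below) =====
def Claim_equal_get_weaknesses_in_password : Prop := ∀ (password : String), Dom_get_weaknesses_in_password password → Spec_get_weaknesses_in_password password (get_weaknesses_in_password password)

-- ===== LEMMAS AND PROOFS =====
theorem pvLoopLower_eq_any (l : List Char) : pvLoopLower l = l.any PySem.Chars.islower := by
  induction l with
  | nil => rfl
  | cons c rest ih => by_cases h : PySem.Chars.islower c <;> simp [pvLoopLower, ih, h]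

theorem pvLoopUpper_eq_any (l : List Char) : pvLoopUpper l = l.any PySem.Chars.isupper := by
  induction l with
  | nil => rfl
  | cons c rest ih => by_cases h : PySem.Chars.isupper c <;> simp [pvLoopUpper, ih, h]

theorem pvLoopDigit_eq_any (l : List Char) : pvLoopDigit l = l.any PySem.Chars.isdigit := by
  induction l with
  | nil => rfl
  | cons c rest ih => by_cases h : PySem.Chars.isdigit c <;> simp [pvLoopDigit, ih, h]

theorem pvScanFlags_eq (l : List Char) (s u d : Bool) :
    pvScanFlags l (s, u, d) =
      (s || l.any PySem.Chars.islower, u || l.any PySem.Chars.isupper, d || l.any PySem.Chars.isdigit) := by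
  induction l generalizing s u d with
  | nil => simp [pvScanFlags]
  | cons c rest ih => simp [pvScanFlags, ih, Bool.or_assoc]

-- ===== VERDICT (by name: the statement is the Claim_ definition above) =====
set_option maxHeartbeats 1600000 in
theorem get_weaknesses_in_password_spec : Claim_equal_get_weaknesses_in_password := by
  intro password _
  unfold Spec_get_weaknesses_in_password get_weaknesses_in_password get_weaknesses_in_password_alt
  simp only [pvScanFlags_eq, pvLoopLower_eq_any, pvLoopUpper_eq_any, pvLoopDigit_eq_any,
    Bool.false_or]
  split_ifs <;>
    (refine congrArg (fun s => PySem.Str.stripChars s "\n") ?_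
     apply String.toList_injective
     simp [PySem.Str.join, PySem.Chars.join, PySem.Int.toList_toStr, List.intercalate, List.intersperse])
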